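-- pv_equiv track=rewrite | github.com/Project-PRAGMA/PriceOfJR-AAAI-2022 | main.py | GreedyCC
-- ===== SOURCE A (Python) =====
-- def maxSupport(V,m):
--     #compute the number of supporters for all candidates
--     counts = [len([v for v in V if c in V[v]]) for c in range(m)]
--     return max(counts)
--
-- def mostPopular(V,m):
--     #compute the number of supporters for all candidates
--     counts = [len([v for v in V if c in V[v]]) for c in range(m)]
--     return counts.index(max(counts))
--
-- def isJR(V,W,m,k,n):
--     #remove all voters which already approve one candidate in W
--     V_new = dict((v,V[v]) for v in V if set(V[v]).intersection(set(W)) == set())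
--
--     if len(V_new) == 0:
--         return True
--
--     if maxSupport(V_new,m) >= float(n)/float(k):
--         return False
--     return True
--
-- def GreedyCC(V,m,k):
--     W = []
--     n = len(V)
--     while(isJR(V,W,m,k,n)==False):
--         c = mostPopular(V,m)
--         W = W + [c]
--         #remove all candidates that approve c
--         V = dict((v,V[v]) for v in V if c not in V[v])
--     return W
-- ===== SOURCE B (Python) =====
-- def GreedyCC(V, m, k):
--     # One pass per round: tally supporter counts over the remaining voters with a
--     # single sweep of their (deduplicated) approval lists, then a linear argmax scan.
--     W = []
--     n = len(V)
--     while V: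
--         counts = [0] * m
--         for v in V:
--             for c in set(V[v]):
--                 if 0 <= c < m:
--                     counts[c] += 1
--         best = 0
--         for c in range(1, m):
--             if counts[c] > counts[best]:
--                 best = c
--         if not (counts[best] >= n / k):
--             break
--         W.append(best)
--         V = {v: V[v] for v in V if best not in V[v]}
--     return W
-- ===== Notes on version B (the rewrite author's own statement) =====
-- stated objective: faster
-- what changed: Each round, instead of recomputing the supporter counts twice via a per-candidate membership scan over all voters (isJR and then mostPopular, O(m*n*L) per round), B tallies all counts in one sweep over the remaining voters' deduplicated approval lists and picks the argmax with a single linear scan, deciding the JR stopping condition from the same tally.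
import Mathlib
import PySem

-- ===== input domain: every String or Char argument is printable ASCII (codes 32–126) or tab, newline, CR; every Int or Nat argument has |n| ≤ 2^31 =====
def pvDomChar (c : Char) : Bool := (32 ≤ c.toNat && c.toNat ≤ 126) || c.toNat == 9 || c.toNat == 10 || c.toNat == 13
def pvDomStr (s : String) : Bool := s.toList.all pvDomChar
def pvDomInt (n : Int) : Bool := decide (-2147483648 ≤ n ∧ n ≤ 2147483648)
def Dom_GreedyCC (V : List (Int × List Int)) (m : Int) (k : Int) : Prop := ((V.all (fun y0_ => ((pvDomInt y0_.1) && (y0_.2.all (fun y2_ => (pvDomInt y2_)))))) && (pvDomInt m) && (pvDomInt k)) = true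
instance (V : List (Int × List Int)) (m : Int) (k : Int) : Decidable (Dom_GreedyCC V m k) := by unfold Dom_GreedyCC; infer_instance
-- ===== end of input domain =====

-- B replaces A's twice-per-round, per-candidate membership scans (isJR then mostPopular recount
-- the supporters of every candidate by scanning every voter's list) with one tally sweep over the
-- remaining voters' deduplicated approval lists plus a linear argmax scan (objective: faster).

-- Exact integer port of Python's comparison `a >= n / k` (true float division; k ≠ 0 whenever it
-- is evaluated under Pre_).  Exact here because a and n are supporter/voter counts far below
-- 2^52, so the float rounding of n/k can never cross an integer.
def pyGeRatio (a n k : Int) : Bool :=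
  if 0 < k then decide (n ≤ a * k) else if k < 0 then decide (a * k ≤ n) else false

-- ===== PORT A =====
-- counts = [len([v for v in V if c in V[v]]) for c in range(m)]  (V is a dict: V[v] is the
-- entry's value; Pre_ rules out duplicate keys, so the pair's second component is that value)
def countsA (V : List (Int × List Int)) (m : Int) : List Int :=
  (PySem.List.pyRange 0 m 1).map (fun c => ((V.filter (fun p => p.2.contains c)).length : Int))

-- max(counts)  (Python raises on an empty list; the `.getD 0` junk is unreachable under Pre_)
def maxSupportA (V : List (Int × List Int)) (m : Int) : Int :=
  (PySem.List.max? (countsA V m) (fun x => x)).getD 0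

-- counts.index(max(counts))  (same unreachable-junk convention for the empty list)
def mostPopularA (V : List (Int × List Int)) (m : Int) : Int :=
  let counts := countsA V m
  (((PySem.List.index? counts ((PySem.List.max? counts (fun x => x)).getD 0)).getD 0 : Nat) : Int)

-- set(V[v]).intersection(set(W)) == set()  ⟺  no element of V[v] lies in W
def isJRA (V : List (Int × List Int)) (W : List Int) (m k n : Int) : Bool :=
  let Vnew := V.filter (fun p => p.2.all (fun c => !(W.contains c)))
  if Vnew.length = 0 then true
  else if pyGeRatio (maxSupportA Vnew m) n k then false else true

-- the while-loop; fuel V.length + 1 suffices: under Pre_ every iteration removes ≥ 1 voter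
def loopA : Nat → List (Int × List Int) → Int → Int → Int → List Int → List Int
  | 0, _, _, _, _, W => W
  | fuel+1, V, m, k, n, W =>
    if isJRA V W m k n = false then
      let c := mostPopularA V m
      loopA fuel (V.filter (fun p => !(p.2.contains c))) m k n (W ++ [c])
    else W

def GreedyCC (V : List (Int × List Int)) (m : Int) (k : Int) : List Int :=
  loopA (V.length + 1) V m k (V.length : Int) []

-- ===== PORT B =====
-- counts[c] += 1  (list update; the `if 0 <= c < m` guard of Source B keeps the index in range)
def stepTally (m : Int) (acc : List Int) (c : Int) : List Int :=
  if 0 ≤ c ∧ c < m then acc.set c.toNat (acc.getD c.toNat 0 + 1) else acc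

-- counts = [0]*m; for v in V: for c in set(V[v]): if 0 <= c < m: counts[c] += 1
-- (the resulting counts do not depend on the iteration order of the Python set)
def tallyB (V : List (Int × List Int)) (m : Int) : List Int :=
  V.foldl (fun acc p => (PySem.Set.ofList p.2).foldl (stepTally m) acc) (List.replicate m.toNat 0)

-- best = 0; for c in range(1, m): if counts[c] > counts[best]: best = c
def argmaxB (counts : List Int) (m : Int) : Int :=
  (PySem.List.pyRange 1 m 1).foldl
    (fun best c => if PySem.List.pyGetD counts best 0 < PySem.List.pyGetD counts c 0 then c else best) 0

def loopB : Nat → List (Int × List Int) → Int → Int → Int → List Int → List Int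
  | 0, _, _, _, _, W => W
  | fuel+1, V, m, k, n, W =>
    if V.length = 0 then W
    else
      let counts := tallyB V m
      let best := argmaxB counts m
      if pyGeRatio (PySem.List.pyGetD counts best 0) n k then
        loopB fuel (V.filter (fun p => !(p.2.contains best))) m k n (W ++ [best])
      else W

def GreedyCC_alt (V : List (Int × List Int)) (m : Int) (k : Int) : List Int :=
  loopB (V.length + 1) V m k (V.length : Int) []

-- ===== PRECONDITION & SPEC =====
-- Pre_ excludes (i) association lists with duplicate voter ids — a Python dict collapses them,
-- so the list form is ambiguous — and (ii) parameter combinations on which the Python A never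
-- returns: with voters present, k = 0 raises ZeroDivisionError, m < 1 raises ValueError
-- (max of an empty list), and k < 0 loops forever when some voter approves no candidate in
-- range(m).  On V = {} A returns [] before touching m or k, so those inputs stay admitted.
def Pre_GreedyCC (V : List (Int × List Int)) (m : Int) (k : Int) : Prop :=
  (V.map Prod.fst).Nodup ∧
  (V = [] ∨ (1 ≤ m ∧ (1 ≤ k ∨ (k ≤ -1 ∧ ∀ p ∈ V, ∃ c ∈ p.2, 0 ≤ c ∧ c < m))))
instance (V : List (Int × List Int)) (m : Int) (k : Int) : Decidable (Pre_GreedyCC V m k) := by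
  unfold Pre_GreedyCC; infer_instance

def pvWitness_GreedyCC : (List (Int × List Int)) × Int × Int := ([(0, [0, 2]), (1, [1]), (2, [0])], 3, 2)

def Spec_GreedyCC (V : List (Int × List Int)) (m : Int) (k : Int) (out : List Int) : Prop := out = GreedyCC_alt V m k
instance (V : List (Int × List Int)) (m : Int) (k : Int) (out : List Int) : Decidable (Spec_GreedyCC V m k out) := by unfold Spec_GreedyCC; infer_instance

-- ===== CLAIM (what is proved, stated in full; the proofs are below) =====
def Claim_equal_GreedyCC : Prop := ∀ (V : List (Int × List Int)) (m : Int) (k : Int), Dom_GreedyCC V m k → Pre_GreedyCC V m k → Spec_GreedyCC V m k (GreedyCC V m k)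

-- ===== LEMMAS AND PROOFS =====
-- The ports agree step for step: tallyB's incrementally built counts equal A's recomputed
-- counts list (tallyB_eq_countsA), B's linear argmax scan equals counts.index(max(counts))
-- (argmax_eq / maxSupport_eq), and the loops preserve the invariant that no remaining voter
-- approves a committee member, which makes A's isJR-filter the identity.

theorem lenStepTally (m : Int) (acc : List Int) (c : Int) :
    (stepTally m acc c).length = acc.length := by
  unfold stepTally; split <;> simp

theorem lenFoldTally (m : Int) (S : List Int) (acc : List Int) :
    (S.foldl (stepTally m) acc).length = acc.length := by
  induction S generalizing acc with
  | nil => rfl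
  | cons c S ihS => rw [List.foldl_cons, ihS, lenStepTally]

theorem lenFoldOuter (m : Int) (V : List (Int × List Int)) (acc : List Int) :
    (V.foldl (fun acc p => (PySem.Set.ofList p.2).foldl (stepTally m) acc) acc).length = acc.length := by
  induction V generalizing acc with
  | nil => rfl
  | cons p V ih => rw [List.foldl_cons, ih, lenFoldTally]

-- after the inner fold, slot j has grown by the number of list elements equal to j (and in range)
theorem getD_foldTally (m : Int) (S : List Int) (acc : List Int) (j : Nat) (hj : j < acc.length) :
    (S.foldl (stepTally m) acc).getD j 0
      = acc.getD j 0 + ((S.countP (fun c => decide (c = (j : Int) ∧ 0 ≤ c ∧ c < m))) : Int) := by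
  induction S generalizing acc with
  | nil => simp
  | cons c S ih =>
    rw [List.foldl_cons, ih _ (by rw [lenStepTally]; exact hj), List.countP_cons]
    have hstep : (stepTally m acc c).getD j 0
        = acc.getD j 0 + (if c = (j : Int) ∧ 0 ≤ c ∧ c < m then (1:Int) else 0) := by
      unfold stepTally
      by_cases hr : 0 ≤ c ∧ c < m
      · by_cases hc : c = (j : Int)
        · have ht : c.toNat = j := by omega
          rw [if_pos hr, ht]
          simp [hc, List.getD, hj]
          omega
        · have ht : c.toNat ≠ j := by omega
          rw [if_pos hr]
          simp [List.getD, ht, hc]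
      · simp [hr]
    rw [hstep]
    by_cases hcond : c = (j : Int) ∧ 0 ≤ c ∧ c < m
    · simp only [decide_eq_true_eq, hcond]
      push_cast; ring
    · simp [hcond]

-- one voter contributes exactly 1 to slot j iff they approve candidate j (dedup via set())
theorem countP_voter (S : List Int) (j : Nat) (m : Int) (hjm : (j : Int) < m) :
    ((PySem.Set.ofList S).countP (fun c => decide (c = (j : Int) ∧ 0 ≤ c ∧ c < m)))
      = if (j : Int) ∈ S then 1 else 0 := by
  have hnd := PySem.Set.nodup_ofList (xs := S)
  by_cases hmem : (j : Int) ∈ S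
  · have hmem' : (j : Int) ∈ PySem.Set.ofList S := by rw [PySem.Set.mem_ofList]; exact hmem
    rw [if_pos hmem]
    have : (fun c => decide (c = (j : Int) ∧ 0 ≤ c ∧ c < m)) = (fun c => c == (j : Int)) := by
      funext c
      by_cases hc : c = (j : Int) <;> simp [hc] <;> omega
    rw [this]
    exact List.count_eq_one_of_mem hnd hmem'
  · rw [if_neg hmem]
    rw [List.countP_eq_zero]
    intro c hc
    simp only [decide_eq_true_eq]
    rintro ⟨rfl, -⟩
    exact hmem (by simpa [PySem.Set.mem_ofList] using hc)

theorem getD_tallyB (V : List (Int × List Int)) (m : Int) (j : Nat) (hj : j < m.toNat) :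
    (tallyB V m).getD j 0 = ((V.countP (fun p => p.2.contains (j : Int))) : Int) := by
  unfold tallyB
  have hjm : (j : Int) < m := by omega
  have main : ∀ (acc : List Int), j < acc.length →
      ((V.foldl (fun acc p => (PySem.Set.ofList p.2).foldl (stepTally m) acc) acc).getD j 0
        = acc.getD j 0 + ((V.countP (fun p => p.2.contains (j : Int))) : Int)) := by
    intro acc
    induction V generalizing acc with
    | nil => simp
    | cons p V ih =>
      intro hja
      rw [List.foldl_cons, ih _ (by rw [lenFoldTally]; exact hja), List.countP_cons,
        getD_foldTally m _ _ _ hja, countP_voter _ _ _ hjm]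
      by_cases hmem : (j : Int) ∈ p.2
      · simp [hmem]
        push_cast
        ring
      · simp [hmem]
  rw [main _ (by simp [hj])]
  simp [hj]

theorem tallyB_eq_countsA (V : List (Int × List Int)) (m : Int) :
    tallyB V m = countsA V m := by
  have hlT : (tallyB V m).length = m.toNat := by
    unfold tallyB; rw [lenFoldOuter, List.length_replicate]
  have hlC : (countsA V m).length = m.toNat := by
    unfold countsA
    rw [List.length_map, PySem.List.length_pyRange_one]
    simp
  apply List.ext_getElem (by rw [hlT, hlC])
  intro i h1 h2
  have hi : i < m.toNat := by omega
  have hT : (tallyB V m)[i] = (tallyB V m).getD i 0 := (List.getD_eq_getElem _ _ h1).symm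
  rw [hT, getD_tallyB V m i hi]
  unfold countsA
  rw [List.getElem_map, PySem.List.getElem_pyRange_one]
  rw [List.countP_eq_length_filter]
  norm_num

-- invariant of B's argmax scan: after considering indices < t, best is the FIRST argmax so far
theorem argmax_inv (L : List Int) (m : Int) (hL : L.length = m.toNat)
    (t : Nat) (h1 : 1 ≤ t) (h2 : t ≤ m.toNat) :
    let b := (PySem.List.pyRange 1 (t : Int) 1).foldl
      (fun best c => if PySem.List.pyGetD L best 0 < PySem.List.pyGetD L c 0 then c else best) 0
    0 ≤ b ∧ b < (t : Int) ∧ (∀ i : Nat, i < t → L.getD i 0 ≤ L.getD b.toNat 0) ∧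
      (∀ i : Nat, (i : Int) < b → L.getD i 0 < L.getD b.toNat 0) := by
  intro b
  induction t with
  | zero => omega
  | succ t ih =>
    by_cases ht : 1 ≤ t
    · have hrec := ih ht (by omega)
      set bt := (PySem.List.pyRange 1 (t : Int) 1).foldl
        (fun best c => if PySem.List.pyGetD L best 0 < PySem.List.pyGetD L c 0 then c else best) 0 with hbt
      obtain ⟨hb0, hblt, hmax, hstrict⟩ := hrec
      have hcast : ((t + 1 : Nat) : Int) = (t : Int) + 1 := by push_cast; ring
      have hsplit : PySem.List.pyRange 1 ((t + 1 : Nat) : Int) 1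
          = PySem.List.pyRange 1 (t : Int) 1 ++ [(t : Int)] := by
        rw [hcast, PySem.List.pyRange_one_succ_right (by omega)]
      have hbb : b = if PySem.List.pyGetD L bt 0 < PySem.List.pyGetD L (t : Int) 0 then (t : Int) else bt := by
        simp only [b, hsplit, List.foldl_append, List.foldl_cons, List.foldl_nil, ← hbt]
      have hgb : PySem.List.pyGetD L bt 0 = L.getD bt.toNat 0 := by
        rw [PySem.List.pyGetD_eq_getElem L 0 hb0 (by omega), List.getD_eq_getElem _ _ (by omega)]
      have hgt : PySem.List.pyGetD L (t : Int) 0 = L.getD t 0 := by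
        rw [PySem.List.pyGetD_eq_getElem L 0 (by omega) (by omega), List.getD_eq_getElem _ _ (by omega)]
        norm_num
      rw [hgb, hgt] at hbb
      by_cases hlt : L.getD bt.toNat 0 < L.getD t 0
      · rw [if_pos hlt] at hbb
        rw [hbb]
        refine ⟨by omega, by omega, ?_, ?_⟩
        · intro i hi
          simp only [Int.toNat_natCast]
          rcases Nat.lt_succ_iff_lt_or_eq.mp hi with h | h
          · exact le_of_lt (lt_of_le_of_lt (hmax i h) hlt)
          · simp [h]
        · intro i hi
          simp only [Int.toNat_natCast]
          have hi' : i < t := by omega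
          exact lt_of_le_of_lt (hmax i hi') hlt
      · rw [if_neg hlt] at hbb
        rw [hbb]
        refine ⟨hb0, by omega, ?_, hstrict⟩
        intro i hi
        rcases Nat.lt_succ_iff_lt_or_eq.mp hi with h | h
        · exact hmax i h
        · subst h; omega
    · have ht1 : t = 0 := by omega
      subst ht1
      have : PySem.List.pyRange 1 ((0 + 1 : Nat) : Int) 1 = [] := by
        apply PySem.List.pyRange_one_eq_nil; norm_num
      simp only [b, this, List.foldl_nil]
      refine ⟨le_refl 0, by norm_num, ?_, by intro i hi; omega⟩
      intro i hi
      have : i = 0 := by omega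
      simp [this]

theorem argmax_char (L : List Int) (m : Int) (hL : L.length = m.toNat) (hm : 1 ≤ m) :
    0 ≤ argmaxB L m ∧ (argmaxB L m) < m ∧
      (∀ i : Nat, i < L.length → L.getD i 0 ≤ L.getD (argmaxB L m).toNat 0) ∧
      (∀ i : Nat, (i : Int) < argmaxB L m → L.getD i 0 < L.getD (argmaxB L m).toNat 0) := by
  have hM : ((m.toNat : Nat) : Int) = m := by omega
  have h := argmax_inv L m hL m.toNat (by omega) (le_refl _)
  rw [hM] at h
  unfold argmaxB
  obtain ⟨a1, a2, a3, a4⟩ := h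
  exact ⟨a1, a2, fun i hi => a3 i (by omega), a4⟩

-- counts.index(max(counts)), the first index of the maximum, is what B's scan computes
theorem argmax_eq (L : List Int) (m : Int) (hL : L.length = m.toNat) :
    (((PySem.List.index? L ((PySem.List.max? L (fun x => x)).getD 0)).getD 0 : Nat) : Int)
      = argmaxB L m := by
  by_cases hm : 1 ≤ m
  case neg =>
    have hnil : L = [] := by
      have : m.toNat = 0 := by omega
      exact List.eq_nil_of_length_eq_zero (by omega)
    subst hnil
    simp [argmaxB, PySem.List.pyRange_one_eq_nil (by omega : m ≤ 1), PySem.List.index?]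
  case pos =>
  have hne : L ≠ [] := by
    intro h; subst h; simp at hL; omega
  obtain ⟨mx, hmx⟩ : ∃ mx, PySem.List.max? L (fun x => x) = some mx := by
    cases hmax : PySem.List.max? L (fun x => x) with
    | none => exact absurd ((PySem.List.max?_eq_none_iff L _).mp hmax) hne
    | some mx => exact ⟨mx, rfl⟩
  have hmem : mx ∈ L := PySem.List.max?_mem hmx
  have hub : ∀ y ∈ L, y ≤ mx := PySem.List.max?_isMax hmx
  obtain ⟨idx, hidx⟩ : ∃ idx, PySem.List.index? L mx = some idx := by
    cases hix : PySem.List.index? L mx with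
    | none => exact absurd hix (by simpa [Option.isSome_iff_ne_none] using
        (PySem.List.index?_isSome_iff L mx).mpr hmem)
    | some i => exact ⟨i, rfl⟩
  obtain ⟨hk, hval, hfirst⟩ := PySem.List.getElem_of_index?_eq_some hidx
  obtain ⟨b0, bm, bmax, bstrict⟩ := argmax_char L m hL hm
  set b := argmaxB L m with hb
  have hbn : b.toNat < L.length := by omega
  have hbmx : L.getD b.toNat 0 = mx := by
    have h1 : L.getD b.toNat 0 ≤ mx := hub _ (by
      rw [List.getD_eq_getElem _ _ hbn]; exact List.getElem_mem hbn)
    have h2 : mx ≤ L.getD b.toNat 0 := by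
      obtain ⟨j, hj, hjv⟩ := List.getElem_of_mem hmem
      have := bmax j hj
      rw [List.getD_eq_getElem _ _ hj, hjv] at this
      exact this
    omega
  have hi1 : ¬ (idx < b.toNat) := by
    intro hlt
    have := bstrict idx (by omega)
    rw [hbmx, List.getD_eq_getElem _ _ hk] at this
    omega
  have hi2 : ¬ (b.toNat < idx) := by
    intro hlt
    apply hfirst b.toNat hlt
    rw [← List.getD_eq_getElem _ _ hbn]
    exact hbmx
  have : idx = b.toNat := by omega
  rw [hmx]
  simp only [Option.getD_some]
  rw [hidx]
  simp only [Option.getD_some, this]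
  omega

theorem maxSupport_eq (L : List Int) (m : Int) (hL : L.length = m.toNat) :
    (PySem.List.max? L (fun x => x)).getD 0 = PySem.List.pyGetD L (argmaxB L m) 0 := by
  by_cases hm : 1 ≤ m
  case neg =>
    have hnil : L = [] := List.eq_nil_of_length_eq_zero (by omega)
    subst hnil
    simp [argmaxB, PySem.List.pyRange_one_eq_nil (by omega : m ≤ 1), PySem.List.pyGetD,
      PySem.List.pyGet?, PySem.List.max?]
  case pos =>
  have hne : L ≠ [] := by intro h; subst h; simp at hL; omega
  obtain ⟨mx, hmx⟩ : ∃ mx, PySem.List.max? L (fun x => x) = some mx := by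
    cases hmax : PySem.List.max? L (fun x => x) with
    | none => exact absurd ((PySem.List.max?_eq_none_iff L _).mp hmax) hne
    | some mx => exact ⟨mx, rfl⟩
  have hub : ∀ y ∈ L, y ≤ mx := PySem.List.max?_isMax hmx
  have hmem : mx ∈ L := PySem.List.max?_mem hmx
  obtain ⟨b0, bm, bmax, bstrict⟩ := argmax_char L m hL hm
  set b := argmaxB L m with hb
  have hbn : b.toNat < L.length := by omega
  have hbmx : L.getD b.toNat 0 = mx := by
    have h1 : L.getD b.toNat 0 ≤ mx := hub _ (by
      rw [List.getD_eq_getElem _ _ hbn]; exact List.getElem_mem hbn)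
    have h2 : mx ≤ L.getD b.toNat 0 := by
      obtain ⟨j, hj, hjv⟩ := List.getElem_of_mem hmem
      have := bmax j hj
      rw [List.getD_eq_getElem _ _ hj, hjv] at this
      exact this
    omega
  rw [hmx, PySem.List.pyGetD_of_nonneg L 0 b0]
  simp only [Option.getD_some]
  exact hbmx.symm

theorem lenCountsA (V : List (Int × List Int)) (m : Int) : (countsA V m).length = m.toNat := by
  unfold countsA; rw [List.length_map, PySem.List.length_pyRange_one]; simp

-- the two loops agree whenever no remaining voter approves a committee member (A's isJR-filter
-- is then the identity); the invariant is preserved because the round's filter removes exactly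
-- the voters approving the newly chosen candidate
theorem loop_eq (fuel : Nat) (V : List (Int × List Int)) (m k n : Int) (W : List Int)
    (hinv : ∀ p ∈ V, ∀ w ∈ W, w ∉ p.2) :
    loopA fuel V m k n W = loopB fuel V m k n W := by
  induction fuel generalizing V W with
  | zero => rfl
  | succ fuel ih =>
    have hfilt : V.filter (fun p => p.2.all (fun c => !(W.contains c))) = V := by
      apply List.filter_eq_self.mpr
      intro p hp
      rw [List.all_eq_true]
      intro c hc
      simp only [Bool.not_eq_eq_eq_not, Bool.not_true, List.contains_eq_mem, decide_eq_false_iff_not]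
      intro hw
      exact hinv p hp c hw hc
    by_cases hV : V = []
    · subst hV
      simp [loopA, loopB, isJRA]
    · have hVlen : ¬ (V.length = 0) := by simpa [List.length_eq_zero_iff] using hV
      have hmp : mostPopularA V m = argmaxB (tallyB V m) m := by
        unfold mostPopularA
        rw [tallyB_eq_countsA]
        exact argmax_eq _ m (lenCountsA V m)
      have hms : maxSupportA V m = PySem.List.pyGetD (tallyB V m) (argmaxB (tallyB V m) m) 0 := by
        unfold maxSupportA
        rw [tallyB_eq_countsA]
        exact maxSupport_eq _ m (lenCountsA V m)
      have hjr : isJRA V W m k n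
          = !(pyGeRatio (PySem.List.pyGetD (tallyB V m) (argmaxB (tallyB V m) m) 0) n k) := by
        unfold isJRA
        simp only [hfilt, if_neg hVlen, ← hms]
        cases pyGeRatio (maxSupportA V m) n k <;> simp
      show loopA (fuel+1) V m k n W = loopB (fuel+1) V m k n W
      rw [loopA, loopB, if_neg hVlen, hjr, hmp]
      by_cases hcond : pyGeRatio (PySem.List.pyGetD (tallyB V m) (argmaxB (tallyB V m) m) 0) n k = true
      case neg =>
        have hc' : pyGeRatio (PySem.List.pyGetD (tallyB V m) (argmaxB (tallyB V m) m) 0) n k = false := by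
          simpa using hcond
        simp [hc']
      case pos =>
        simp only [hcond, Bool.not_true, reduceIte]
        apply ih
        intro p hp w hw
        rw [List.mem_filter] at hp
        rcases List.mem_append.mp hw with h | h
        · exact hinv p hp.1 w h
        · rw [List.mem_singleton] at h
          subst h
          have := hp.2
          simp only [Bool.not_eq_eq_eq_not, Bool.not_true, List.contains_eq_mem,
            decide_eq_false_iff_not] at this
          exact this

-- ===== VERDICT (by name: the statement is the Claim_ definition above) =====
theorem GreedyCC_spec : Claim_equal_GreedyCC := by
  intro V m k _dom _pre
  unfold Spec_GreedyCC GreedyCC GreedyCC_alt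
  exact loop_eq _ V m k _ [] (by simp)
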